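-- pv_equiv track=rewrite | github.com/Ayush-Tiwari1/DSA | Days.44/4.Remove-Invalid-Parentheses.py | CountInvalidParentheses
-- ===== SOURCE A (Python) =====
-- def CountInvalidParentheses(string):
--     stack=[]
--     for char in string:
--         if char=='(':
--             stack.append(char)
--         elif char==')':
--             if len(stack)==0 or stack[-1]==')':
--                 stack.append(char)
--             else:
--                 stack.pop()
--     return len(stack)
-- ===== SOURCE B (Python) =====
-- def CountInvalidParentheses(string):
--     # Balance arithmetic: unmatched ')' = -min(0, minimum prefix balance),
--     # unmatched '(' = total balance + unmatched ')'. Answer = total - 2*low.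
--     deltas = [(c == '(') - (c == ')') for c in string]
--     total = sum(deltas)
--     low = 0
--     run = 0
--     for d in deltas:
--         run += d
--         if run < low:
--             low = run
--     return total - 2 * low
-- ===== Notes on version B (the rewrite author's own statement) =====
-- stated objective: alternative
-- what changed: Replaces A's greedy stack matching with balance arithmetic: map characters to +1/-1 deltas, take the total balance and the minimum prefix balance, and return the closed formula total - 2*min(0, min prefix), which equals the number of unmatched parentheses.
import Mathlib
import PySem

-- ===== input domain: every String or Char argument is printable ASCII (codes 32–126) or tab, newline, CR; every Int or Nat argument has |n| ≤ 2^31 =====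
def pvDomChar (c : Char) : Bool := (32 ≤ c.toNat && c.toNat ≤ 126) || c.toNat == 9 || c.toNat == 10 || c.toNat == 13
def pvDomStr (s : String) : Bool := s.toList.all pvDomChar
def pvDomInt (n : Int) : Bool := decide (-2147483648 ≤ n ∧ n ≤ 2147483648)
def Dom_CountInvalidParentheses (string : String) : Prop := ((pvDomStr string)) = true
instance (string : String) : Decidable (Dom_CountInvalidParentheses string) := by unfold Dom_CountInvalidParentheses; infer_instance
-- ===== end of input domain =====

-- B replaces A's greedy stack matching with balance arithmetic (delta map, total balance,
-- minimum prefix balance, closed formula total - 2*low); return value only.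
-- ===== PORT A =====
def pvAStep (stack : List Char) (char : Char) : List Char :=
  if char = '(' then stack ++ ['(']
  else if char = ')' then
    -- Python: `if len(stack)==0 or stack[-1]==')'` (short-circuit `or`)
    if stack.length = 0 then stack ++ [')']
    else if PySem.List.pyGetD stack (-1) ' ' = ')' then stack ++ [')']
    else stack.dropLast  -- stack.pop()
  else stack

def CountInvalidParentheses (string : String) : Int :=
  ((string.toList.foldl pvAStep []).length : Int)

-- ===== PORT B =====
-- (c == '(') - (c == ')')
def pvDelta (c : Char) : Int :=
  (if c = '(' then 1 else 0) - (if c = ')' then 1 else 0)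

-- the `for d in deltas` loop: state (run, low)
def pvBStep (p : Int × Int) (d : Int) : Int × Int :=
  let run := p.1 + d
  (run, if run < p.2 then run else p.2)

def CountInvalidParentheses_alt (string : String) : Int :=
  let deltas := string.toList.map pvDelta
  let total := deltas.sum
  let p := deltas.foldl pvBStep (0, 0)
  total - 2 * p.2

-- ===== PRECONDITION & SPEC =====
def Spec_CountInvalidParentheses (string : String) (out : Int) : Prop := out = CountInvalidParentheses_alt string
instance (string : String) (out : Int) : Decidable (Spec_CountInvalidParentheses string out) := by unfold Spec_CountInvalidParentheses; infer_instance

-- ===== CLAIM (what is proved, stated in full; the proofs are below) =====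
def Claim_equal_CountInvalidParentheses : Prop := ∀ (string : String), Dom_CountInvalidParentheses string → Spec_CountInvalidParentheses string (CountInvalidParentheses string)

-- ===== LEMMAS AND PROOFS =====

-- Nat-counter mirror of A's loop, used to state both invariants.
def pvNStep (p : Nat × Nat) (char : Char) : Nat × Nat :=
  if char = '(' then (p.1 + 1, p.2)
  else if char = ')' then
    if 0 < p.1 then (p.1 - 1, p.2) else (p.1, p.2 + 1)
  else p

theorem pvGetD_last (l : List Char) (a d : Char) :
    PySem.List.pyGetD (l ++ [a]) (-1) d = a := by
  rw [PySem.List.pyGetD_neg_one _ _ (by simp)]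
  exact List.getLast_append_singleton l

-- A's stack is always a block of unmatched ')' below a block of unmatched '('.
theorem pvA_inv (l : List Char) : ∀ (o c : Nat),
    l.foldl pvAStep (List.replicate c ')' ++ List.replicate o '(') =
      List.replicate (l.foldl pvNStep (o, c)).2 ')' ++
        List.replicate (l.foldl pvNStep (o, c)).1 '(' := by
  induction l with
  | nil => intro o c; simp
  | cons ch t ih =>
    intro o c
    simp only [List.foldl_cons]
    by_cases hop : ch = '('
    · rw [show pvAStep (List.replicate c ')' ++ List.replicate o '(') ch
            = List.replicate c ')' ++ List.replicate (o + 1) '(' by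
        simp [pvAStep, hop, List.replicate_succ', List.append_assoc]]
      rw [show pvNStep (o, c) ch = (o + 1, c) by simp [pvNStep, hop]]
      exact ih (o + 1) c
    · by_cases hcl : ch = ')'
      · cases o with
        | zero =>
          rw [show pvAStep (List.replicate c ')' ++ List.replicate 0 '(') ch
                = List.replicate (c + 1) ')' ++ List.replicate 0 '(' by
            cases c with
            | zero => simp [pvAStep, hcl]
            | succ c' =>
              rw [show List.replicate (c' + 1) ')' ++ List.replicate 0 '('
                    = List.replicate c' ')' ++ [')'] by
                simp [List.replicate_succ']]
              unfold pvAStep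
              rw [if_neg hop, if_pos hcl, if_neg (by simp), if_pos (pvGetD_last _ _ _)]
              simp [List.replicate_succ', List.append_assoc]]
          rw [show pvNStep (0, c) ch = (0, c + 1) by simp [pvNStep, hcl]]
          exact ih 0 (c + 1)
        | succ o' =>
          rw [show pvAStep (List.replicate c ')' ++ List.replicate (o' + 1) '(') ch
                = List.replicate c ')' ++ List.replicate o' '(' by
            rw [show List.replicate c ')' ++ List.replicate (o' + 1) '('
                  = (List.replicate c ')' ++ List.replicate o' '(') ++ ['('] by
              simp [List.replicate_succ', List.append_assoc]]
            unfold pvAStep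
            rw [if_neg hop, if_pos hcl, if_neg (by simp),
              if_neg (by rw [pvGetD_last]; decide)]
            simp]
          rw [show pvNStep (o' + 1, c) ch = (o', c) by simp [pvNStep, hcl]]
          exact ih o' c
      · rw [show pvAStep (List.replicate c ')' ++ List.replicate o '(') ch
              = List.replicate c ')' ++ List.replicate o '(' by simp [pvAStep, hop, hcl]]
        rw [show pvNStep (o, c) ch = (o, c) by simp [pvNStep, hop, hcl]]
        exact ih o c

-- The sum of the deltas is the difference of the two counters.
theorem pvSum_deltas (l : List Char) : ∀ (o c : Nat),
    (l.map pvDelta).sum = ((l.foldl pvNStep (o, c)).1 : Int) - (l.foldl pvNStep (o, c)).2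
      - ((o : Int) - c) := by
  induction l with
  | nil => intro o c; simp
  | cons ch t ih =>
    intro o c
    simp only [List.map_cons, List.sum_cons, List.foldl_cons]
    by_cases hop : ch = '('
    · rw [show pvNStep (o, c) ch = (o + 1, c) by simp [pvNStep, hop], ih (o + 1) c,
        show pvDelta ch = 1 by simp [pvDelta, hop]]
      push_cast; ring
    · by_cases hcl : ch = ')'
      · cases o with
        | zero =>
          rw [show pvNStep (0, c) ch = (0, c + 1) by simp [pvNStep, hcl], ih 0 (c + 1),
            show pvDelta ch = -1 by simp [pvDelta, hcl]]
          push_cast; ring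
        | succ o' =>
          rw [show pvNStep (o' + 1, c) ch = (o', c) by simp [pvNStep, hcl], ih o' c,
            show pvDelta ch = -1 by simp [pvDelta, hcl]]
          push_cast; ring
      · rw [show pvNStep (o, c) ch = (o, c) by simp [pvNStep, hop, hcl], ih o c,
          show pvDelta ch = 0 by simp [pvDelta, hop, hcl]]
        ring

-- B's (run, low) scan over the deltas computes (o - c, -c) for the counter fold.
theorem pvB_link (l : List Char) : ∀ (o c : Nat),
    (l.map pvDelta).foldl pvBStep ((o : Int) - c, -(c : Int)) =
      (((l.foldl pvNStep (o, c)).1 : Int) - (l.foldl pvNStep (o, c)).2,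
        -((l.foldl pvNStep (o, c)).2 : Int)) := by
  induction l with
  | nil => intro o c; simp
  | cons ch t ih =>
    intro o c
    simp only [List.map_cons, List.foldl_cons]
    by_cases hop : ch = '('
    · rw [show pvBStep ((o : Int) - c, -(c : Int)) (pvDelta ch)
            = (((o + 1 : Nat) : Int) - c, -(c : Int)) by
        rw [show pvDelta ch = 1 by simp [pvDelta, hop]]
        unfold pvBStep
        dsimp only
        rw [if_neg (by omega)]
        simp only [Prod.mk.injEq]
        exact ⟨by push_cast; ring, trivial⟩]
      rw [show pvNStep (o, c) ch = (o + 1, c) by simp [pvNStep, hop]]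
      exact ih (o + 1) c
    · by_cases hcl : ch = ')'
      · cases o with
        | zero =>
          rw [show pvBStep (((0 : Nat) : Int) - c, -(c : Int)) (pvDelta ch)
                = (((0 : Nat) : Int) - ((c + 1 : Nat) : Int), -((c + 1 : Nat) : Int)) by
            rw [show pvDelta ch = -1 by simp [pvDelta, hcl]]
            unfold pvBStep
            dsimp only
            rw [if_pos (by push_cast; omega)]
            simp only [Prod.mk.injEq]
            exact ⟨by push_cast; ring, by push_cast; ring⟩]
          rw [show pvNStep (0, c) ch = (0, c + 1) by simp [pvNStep, hcl]]
          exact ih 0 (c + 1)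
        | succ o' =>
          rw [show pvBStep (((o' + 1 : Nat) : Int) - c, -(c : Int)) (pvDelta ch)
                = (((o' : Nat) : Int) - c, -(c : Int)) by
            rw [show pvDelta ch = -1 by simp [pvDelta, hcl]]
            unfold pvBStep
            dsimp only
            rw [if_neg (by push_cast; omega)]
            simp only [Prod.mk.injEq]
            exact ⟨by push_cast; ring, trivial⟩]
          rw [show pvNStep (o' + 1, c) ch = (o', c) by simp [pvNStep, hcl]]
          exact ih o' c
      · rw [show pvBStep ((o : Int) - c, -(c : Int)) (pvDelta ch)
              = ((o : Int) - c, -(c : Int)) by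
          rw [show pvDelta ch = 0 by simp [pvDelta, hop, hcl]]
          unfold pvBStep
          dsimp only
          rw [if_neg (by omega)]
          simp]
        rw [show pvNStep (o, c) ch = (o, c) by simp [pvNStep, hop, hcl]]
        exact ih o c

-- ===== VERDICT (by name: the statement is the Claim_ definition above) =====
theorem CountInvalidParentheses_spec : Claim_equal_CountInvalidParentheses := by
  intro s _
  unfold Spec_CountInvalidParentheses CountInvalidParentheses CountInvalidParentheses_alt
  show _ = (List.map pvDelta s.toList).sum
      - 2 * (List.foldl pvBStep (0, 0) (List.map pvDelta s.toList)).2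
  have hA := pvA_inv s.toList 0 0
  have hS := pvSum_deltas s.toList 0 0
  have hL := pvB_link s.toList 0 0
  simp only [List.replicate, List.append_nil] at hA
  simp only [Nat.cast_zero, sub_zero, neg_zero, sub_self] at hS hL
  rw [hA, hS, hL]
  simp only [List.length_append, List.length_replicate]
  push_cast
  ring
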